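-- pv_equiv track=rewrite | github.com/wingnut9999/Cold_Case_Toolkit | tools/pattern_cluster.py | pattern_cluster
-- ===== SOURCE A (Python) =====
-- from collections import defaultdict
--
-- def pattern_cluster(dates):
--     clusters = defaultdict(list)
--     for date in dates:
--         parts = date.split('-')
--         if len(parts) == 3:
--             month_day = f"{parts[1]}-{parts[2]}"
--             clusters[month_day].append(date)
--     return dict(clusters)
-- ===== SOURCE B (Python) =====
-- def pattern_cluster(dates):
--     keyed = [("-".join(d.split('-')[1:3]), d) for d in dates if len(d.split('-')) == 3]
--     keys = list(dict.fromkeys(k for k, _ in keyed))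
--     return {k: [d for k2, d in keyed if k2 == k] for k in keys}
-- ===== Notes on version B (the rewrite author's own statement) =====
-- stated objective: alternative
-- what changed: A builds the groups incrementally in one pass with a defaultdict; B first builds a (key, date) list for the well-formed dates, dedups the keys in first-occurrence order, and then collects each group with a per-key filter.
import Mathlib
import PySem

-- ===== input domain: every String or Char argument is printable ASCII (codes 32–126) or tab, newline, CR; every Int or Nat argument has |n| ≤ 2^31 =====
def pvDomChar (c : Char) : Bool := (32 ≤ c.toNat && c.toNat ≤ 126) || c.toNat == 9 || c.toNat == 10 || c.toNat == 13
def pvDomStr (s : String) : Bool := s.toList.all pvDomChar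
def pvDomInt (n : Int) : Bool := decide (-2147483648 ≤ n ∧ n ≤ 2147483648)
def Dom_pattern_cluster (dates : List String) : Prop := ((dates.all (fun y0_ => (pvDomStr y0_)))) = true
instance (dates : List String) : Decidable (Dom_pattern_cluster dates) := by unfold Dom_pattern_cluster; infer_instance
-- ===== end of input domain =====

-- B replaces A's incremental defaultdict loop by a three-stage pipeline (key the valid
-- dates, dedup the keys in first-occurrence order, collect each group by a filter);
-- alternative decomposition, same results, not claimed faster.

-- ===== PORT A =====
-- s.split('-'): the separator "-" is nonempty, so PySem.Str.split? is always `some`; exact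
def pvSplitDash (s : String) : List String := (PySem.Str.split? s "-").getD []

def pattern_cluster (dates : List String) : List (String × List String) :=
  (dates.foldl
    (fun (clusters : PySem.Dict String (List String)) date =>
      let parts := pvSplitDash date
      if parts.length == 3 then
        -- f"{parts[1]}-{parts[2]}": indices 1,2 are in range (length = 3), so List.getD is exact
        clusters.modify (PySem.Str.join "" [parts.getD 1 "", "-", parts.getD 2 ""]) []
          (fun l => l ++ [date])
      else clusters)
    PySem.Dict.empty).items

-- ===== PORT B =====
def pattern_cluster_alt (dates : List String) : List (String × List String) :=
  let keyed := (dates.filter (fun d => (pvSplitDash d).length == 3)).map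
      (fun d => (PySem.Str.join "-" (PySem.List.slice (pvSplitDash d) (some 1) (some 3)), d))
  let keys := PySem.List.dedup (keyed.map (·.1))
  keys.map (fun k => (k, (keyed.filter (fun p => p.1 == k)).map (·.2)))

-- ===== PRECONDITION & SPEC =====
def Spec_pattern_cluster (dates : List String) (out : List (String × List String)) : Prop := out = pattern_cluster_alt dates
instance (dates : List String) (out : List (String × List String)) : Decidable (Spec_pattern_cluster dates out) := by unfold Spec_pattern_cluster; infer_instance

-- ===== CLAIM (what is proved, stated in full; the proofs are below) =====
def Claim_equal_pattern_cluster : Prop := ∀ (dates : List String), Dom_pattern_cluster dates → Spec_pattern_cluster dates (pattern_cluster dates)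

-- ===== LEMMAS AND PROOFS =====

-- A's f-string key and B's join-of-slice key agree on a 3-part split.
theorem pv_key_eq (parts : List String) (h : parts.length = 3) :
    PySem.Str.join "" [parts.getD 1 "", "-", parts.getD 2 ""]
      = PySem.Str.join "-" (PySem.List.slice parts (some 1) (some 3)) := by
  match parts, h with
  | [a, b, c], _ =>
    simp [PySem.Str.join, PySem.Chars.join, List.intercalate, List.intersperse, PySem.List.slice]

-- the grouping fold characterised: items = dedup'd keys, each paired with its filtered group
theorem pv_core (l : List String) (key : String → String) :
    (List.foldl (fun (d : PySem.Dict String (List String)) date =>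
        d.modify (key date) [] (fun g => g ++ [date])) PySem.Dict.empty l).items
      = (PySem.List.dedup (l.map key)).map
          (fun k => (k, ((l.map (fun d => (key d, d))).filter (fun p => p.1 == k)).map (·.2))) := by
  have hfold : List.foldl (fun (d : PySem.Dict String (List String)) date =>
        d.modify (key date) [] (fun g => g ++ [date])) PySem.Dict.empty l
      = List.foldl (fun (d : PySem.Dict String (List String)) (p : String × String) =>
          d.modify p.1 [] (fun g => g ++ [p.2])) PySem.Dict.empty (l.map (fun d => (key d, d))) := by
    rw [List.foldl_map]
  have hnd : (List.foldl (fun (d : PySem.Dict String (List String)) date =>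
        d.modify (key date) [] (fun g => g ++ [date])) PySem.Dict.empty l).keys.Nodup :=
    PySem.Dict.nodup_keys_foldl_modify_key l key [] (fun _ x => fun g => g ++ [x])
      PySem.Dict.empty (by simp [PySem.Dict.keys_empty])
  have hkeys : (List.foldl (fun (d : PySem.Dict String (List String)) date =>
        d.modify (key date) [] (fun g => g ++ [date])) PySem.Dict.empty l).keys
      = PySem.List.dedup (l.map key) := by
    rw [PySem.Dict.keys_foldl_modify_key]
    simp [PySem.Dict.keys_empty, PySem.List.dedup_eq_ofList, PySem.Set.ofList_eq_foldl, PySem.Set.update]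
  rw [PySem.Dict.items_eq_map_keys _ hnd [], hkeys]
  apply List.map_congr_left
  intro k _
  rw [hfold, PySem.Dict.getD_foldl_modify_append]
  simp [PySem.Dict.getD_empty]

theorem pattern_cluster_spec : Claim_equal_pattern_cluster := by
  intro dates _
  show pattern_cluster dates = pattern_cluster_alt dates
  unfold pattern_cluster pattern_cluster_alt
  rw [PySem.List.foldl_if_eq_foldl_filter]
  have hcongr := PySem.List.foldl_congr_mem
    (l := dates.filter (fun d => (pvSplitDash d).length == 3))
    (init := (PySem.Dict.empty : PySem.Dict String (List String)))
    (f := fun clusters date => clusters.modify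
      (PySem.Str.join "" [(pvSplitDash date).getD 1 "", "-", (pvSplitDash date).getD 2 ""]) []
      (fun l => l ++ [date]))
    (g := fun clusters date => clusters.modify
      (PySem.Str.join "-" (PySem.List.slice (pvSplitDash date) (some 1) (some 3))) []
      (fun l => l ++ [date]))
    (by
      intro acc x hx
      have hP := List.of_mem_filter hx
      simp only [beq_iff_eq] at hP
      simp only [pv_key_eq _ hP])
  rw [hcongr, pv_core]
  simp [List.map_map, Function.comp_def]
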